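-- pv_equiv track=rewrite | github.com/benrich37/Periodic-PyGSM | funcs/connec.py | filter_for_ic_edges
-- ===== SOURCE A (Python) =====
-- def filter_for_ic_edges(edges):
--     """ Takes a list of edges and organizes them into a dict by their length,
--     discarding any edge too long to be a useful internal coordinate
--     :param (list[list[int]]) edges:
--     :return (dict) edges_by_length:
--     """
--     edges_by_length = {0: [],
--                        1: [],
--                        2: [],
--                        3: [],
--                        4: []}
--     for e in edges:
--         if len(e) < 5:
--             edges_by_length[len(e)].append(e)
--     return edges_by_length
-- ===== SOURCE B (Python) =====
-- def filter_for_ic_edges(edges):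
--     """ Takes a list of edges and organizes them into a dict by their length,
--     discarding any edge too long to be a useful internal coordinate """
--     return {i: [e for e in edges if len(e) == i] for i in range(5)}
-- ===== Notes on version B (the rewrite author's own statement) =====
-- stated objective: idiomatic
-- what changed: Replaces the preallocated-dict append-dispatch loop with a dict comprehension over the fixed key range 0..4, each bucket built by its own filtering pass over edges.
import Mathlib
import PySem

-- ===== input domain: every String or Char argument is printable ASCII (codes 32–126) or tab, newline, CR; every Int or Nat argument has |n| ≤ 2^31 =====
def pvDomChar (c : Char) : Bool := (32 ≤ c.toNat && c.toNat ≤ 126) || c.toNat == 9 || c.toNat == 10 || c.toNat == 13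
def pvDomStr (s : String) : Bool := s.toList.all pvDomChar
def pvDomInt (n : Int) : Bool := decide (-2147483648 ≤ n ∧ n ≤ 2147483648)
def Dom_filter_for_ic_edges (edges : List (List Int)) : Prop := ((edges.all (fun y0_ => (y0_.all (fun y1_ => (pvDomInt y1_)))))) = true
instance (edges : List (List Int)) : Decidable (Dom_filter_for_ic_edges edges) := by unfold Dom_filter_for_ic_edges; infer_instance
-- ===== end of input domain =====

-- B replaces A's single append-dispatch loop into a preallocated dict with a dict
-- comprehension over the fixed key range 0..4, one filtering pass per bucket (idiomatic).

-- ===== PORT A =====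
def filter_for_ic_edges (edges : List (List Int)) : List (Int × List (List Int)) :=
  (edges.foldl
    (fun d e =>
      if (e.length : Int) < 5 then d.modify (e.length : Int) [] (fun v => v ++ [e]) else d)
    (PySem.Dict.ofList [(0, []), (1, []), (2, []), (3, []), (4, [])])).items

-- ===== PORT B =====
def filter_for_ic_edges_alt (edges : List (List Int)) : List (Int × List (List Int)) :=
  (PySem.List.pyRange 0 5 1).map (fun i => (i, edges.filter (fun e => (e.length : Int) == i)))

-- ===== PRECONDITION & SPEC =====
def Spec_filter_for_ic_edges (edges : List (List Int)) (out : List (Int × List (List Int))) : Prop := out = filter_for_ic_edges_alt edges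
instance (edges : List (List Int)) (out : List (Int × List (List Int))) : Decidable (Spec_filter_for_ic_edges edges out) := by unfold Spec_filter_for_ic_edges; infer_instance

-- ===== CLAIM (what is proved, stated in full; the proofs are below) =====
def Claim_equal_filter_for_ic_edges : Prop := ∀ (edges : List (List Int)), Dom_filter_for_ic_edges edges → Spec_filter_for_ic_edges edges (filter_for_ic_edges edges)

-- ===== LEMMAS AND PROOFS =====

-- A's guarded loop is the plain modify-loop over the (key, edge) pairs of the short edges.
theorem pvGuardEq (edges : List (List Int)) (d : PySem.Dict Int (List (List Int))) :
    edges.foldl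
      (fun d e =>
        if (e.length : Int) < 5 then d.modify (e.length : Int) [] (fun v => v ++ [e]) else d) d
    = ((edges.filter (fun e => decide ((e.length : Int) < 5))).map
        (fun e => ((e.length : Int), e))).foldl
        (fun d p => d.modify p.1 [] (fun v => v ++ [p.2])) d := by
  induction edges generalizing d with
  | nil => rfl
  | cons e es ih =>
    by_cases h : (e.length : Int) < 5 <;>
      simp only [List.foldl, List.filter, h, decide_true, decide_false, if_pos, if_neg,
        not_false_iff] <;> exact ih _

theorem pvUpdateOfMem {α : Type} [BEq α] (xs : List α) (s : PySem.Set α)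
    (h : ∀ x ∈ xs, s.contains x = true) : PySem.Set.update s xs = s := by
  induction xs with
  | nil => rfl
  | cons x xs ih =>
    have hx := h x (List.mem_cons_self)
    simp only [PySem.Set.update, List.foldl, PySem.Set.add, hx, if_pos]
    exact ih fun y hy => h y (List.mem_cons_of_mem _ hy)

theorem pvContains5 (k : Int) (h0 : 0 ≤ k) (h5 : k < 5) :
    ([0, 1, 2, 3, 4] : List Int).contains k = true := by
  simp only [List.contains, List.elem_eq_mem, decide_eq_true_eq, List.mem_cons]
  omega

-- ===== VERDICT (by name: the statement is the Claim_ definition above) =====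
theorem filter_for_ic_edges_spec : Claim_equal_filter_for_ic_edges := by
  intro edges _
  unfold Spec_filter_for_ic_edges filter_for_ic_edges filter_for_ic_edges_alt
  rw [pvGuardEq]
  set l := ((edges.filter (fun e => decide ((e.length : Int) < 5))).map
      (fun e => ((e.length : Int), e))) with hl
  set init : PySem.Dict Int (List (List Int)) :=
    PySem.Dict.ofList [(0, []), (1, []), (2, []), (3, []), (4, [])] with hinit
  have hkeys : (l.foldl (fun d p => d.modify p.1 [] (fun v => v ++ [p.2])) init).keys
      = [0, 1, 2, 3, 4] := by
    have := PySem.Dict.keys_foldl_modify_key l (fun p => p.1) []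
      (fun _ p v => v ++ [p.2]) init
    rw [this, show init.keys = [0, 1, 2, 3, 4] from rfl]
    apply pvUpdateOfMem
    intro x hx
    simp only [hl, List.map_map, List.mem_map, Function.comp] at hx
    obtain ⟨e, he, hxe⟩ := hx
    rw [List.mem_filter] at he
    exact hxe ▸ pvContains5 _ (by positivity) (by simpa using he.2)
  have hnd : (l.foldl (fun d p => d.modify p.1 [] (fun v => v ++ [p.2])) init).keys.Nodup := by
    rw [hkeys]; decide
  rw [PySem.Dict.items_eq_map_keys _ hnd [], hkeys]
  have hg : ∀ c : Int, 0 ≤ c → c < 5 →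
      (l.foldl (fun d p => d.modify p.1 [] (fun v => v ++ [p.2])) init).getD c []
        = edges.filter (fun e => (e.length : Int) == c) := by
    intro c hc0 hc5
    rw [PySem.Dict.getD_foldl_modify_append]
    have hinitD : init.getD c [] = [] := by
      simp only [hinit]
      rcases (by omega : c = 0 ∨ c = 1 ∨ c = 2 ∨ c = 3 ∨ c = 4) with h | h | h | h | h <;>
        subst h <;> decide
    rw [hinitD, List.nil_append, hl, List.filter_map, List.map_map]
    simp only [Function.comp_def, List.map_id', List.filter_filter]
    apply List.filter_congr
    intro e _
    by_cases he : (e.length : Int) = c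
    · simp [he, hc5]
    · simp [he]
  rw [show PySem.List.pyRange 0 5 1 = [0, 1, 2, 3, 4] from by decide]
  simp only [List.map]
  rw [hg 0 (by norm_num) (by norm_num), hg 1 (by norm_num) (by norm_num),
    hg 2 (by norm_num) (by norm_num), hg 3 (by norm_num) (by norm_num),
    hg 4 (by norm_num) (by norm_num)]
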